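-- pv_equiv track=rewrite | github.com/Deen-Codes/gymflow-backend | apps/nutrition/dashboard_api_views.py | _exact_match_boost
-- ===== SOURCE A (Python) =====
-- def _exact_match_boost(items, query):
--     """Re-rank results so exact / near-exact name matches float to the top.
--
--     The default OFF order surfaces popular compound products like
--     "Almond milk" before the literal "Almonds". Trainers searching
--     "almond" almost always want the literal first. We bucket results
--     into match-quality tiers and concatenate, preserving relative
--     order inside each tier.
--     """
--     q = (query or "").strip().lower()
--     if not q:
--         return items
--
--     exact, plural, starts, contains, rest = [], [], [], [], []
--     for item in items:
--         n = (item.get("name") or "").strip().lower()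
--         if n == q:
--             exact.append(item)
--         elif n in (q + "s", q + "es") or q in (n + "s", n + "es"):
--             plural.append(item)
--         elif n.startswith(q + " ") or n.startswith(q + ","):
--             starts.append(item)
--         elif f" {q} " in f" {n} " or n.endswith(" " + q):
--             contains.append(item)
--         else:
--             rest.append(item)
--
--     return exact + plural + starts + contains + rest
-- ===== SOURCE B (Python) =====
-- def _exact_match_boost(items, query):
--     """Rank-then-bucket rewrite: compute a match-quality tier 0..4 per item
--     once, then emit the items tier by tier with a filtering comprehension."""
--     q = (query or "").strip().lower()
--     if not q:
--         return items
--
--     def _rank(item):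
--         n = (item.get("name") or "").strip().lower()
--         if n == q:
--             return 0
--         if n in (q + "s", q + "es") or q in (n + "s", n + "es"):
--             return 1
--         if n.startswith(q + " ") or n.startswith(q + ","):
--             return 2
--         if f" {q} " in f" {n} " or n.endswith(" " + q):
--             return 3
--         return 4
--
--     return [item for tier in range(5) for item in items if _rank(item) == tier]
-- ===== Notes on version B (the rewrite author's own statement) =====
-- stated objective: alternative
-- what changed: Replaces the single pass that appends each item into one of five accumulator lists (then concatenates) by a per-item tier function _rank (same elif precedence, 0..4) and a comprehension that emits the items tier by tier, filtering the list once per tier.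
import Mathlib
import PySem

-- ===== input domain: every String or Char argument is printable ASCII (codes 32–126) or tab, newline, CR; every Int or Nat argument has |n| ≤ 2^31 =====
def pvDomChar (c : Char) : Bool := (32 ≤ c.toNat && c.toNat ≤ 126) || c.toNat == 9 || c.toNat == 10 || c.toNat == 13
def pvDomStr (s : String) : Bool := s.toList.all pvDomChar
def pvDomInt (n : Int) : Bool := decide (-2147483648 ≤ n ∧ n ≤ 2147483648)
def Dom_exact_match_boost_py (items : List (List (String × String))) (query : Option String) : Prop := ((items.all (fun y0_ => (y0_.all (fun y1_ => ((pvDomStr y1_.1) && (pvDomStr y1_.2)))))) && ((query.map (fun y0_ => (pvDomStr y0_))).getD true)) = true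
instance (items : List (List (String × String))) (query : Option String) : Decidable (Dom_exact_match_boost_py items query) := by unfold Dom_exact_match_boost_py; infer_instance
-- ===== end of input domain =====

-- B replaces A's single pass into five accumulator lists by a per-item tier rank 0..4
-- plus one filtering pass per tier (objective: alternative decomposition, same output).


-- ===== PORT A =====
-- the body of A's for-loop: route one item into one of the five buckets
def pvStepA (q : String)
    (acc : List (List (String × String)) × List (List (String × String)) × List (List (String × String)) × List (List (String × String)) × List (List (String × String)))
    (item : List (String × String)) :
    List (List (String × String)) × List (List (String × String)) × List (List (String × String)) × List (List (String × String)) × List (List (String × String)) :=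
  let (e, p, s, c, r) := acc
  let n := PySem.Str.lower (PySem.Str.strip (((PySem.Dict.mk item).get? "name").getD ""))
  if n = q then (e ++ [item], p, s, c, r)
  else if n = q ++ "s" ∨ n = q ++ "es" ∨ q = n ++ "s" ∨ q = n ++ "es" then (e, p ++ [item], s, c, r)
  else if PySem.Str.startswith n (q ++ " ") || PySem.Str.startswith n (q ++ ",") then (e, p, s ++ [item], c, r)
  else if PySem.Str.isIn (" " ++ q ++ " ") (" " ++ n ++ " ") || PySem.Str.endswith n (" " ++ q) then (e, p, s, c ++ [item], r)
  else (e, p, s, c, r ++ [item])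

-- one pass over items, appending each item to one of five bucket lists, then concatenation
def exact_match_boost_py (items : List (List (String × String))) (query : Option String) : List (List (String × String)) :=
  let q := PySem.Str.lower (PySem.Str.strip (query.getD ""))
  if q = "" then items
  else
    let st := items.foldl (pvStepA q) ([], [], [], [], [])
    st.1 ++ st.2.1 ++ st.2.2.1 ++ st.2.2.2.1 ++ st.2.2.2.2

-- ===== PORT B =====
-- B's helper _rank: the match-quality tier (0..4) of one item for the normalized query q
def pvRank (q : String) (item : List (String × String)) : Int :=
  let n := PySem.Str.lower (PySem.Str.strip (((PySem.Dict.mk item).get? "name").getD ""))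
  if n = q then 0
  else if n = q ++ "s" ∨ n = q ++ "es" ∨ q = n ++ "s" ∨ q = n ++ "es" then 1
  else if PySem.Str.startswith n (q ++ " ") || PySem.Str.startswith n (q ++ ",") then 2
  else if PySem.Str.isIn (" " ++ q ++ " ") (" " ++ n ++ " ") || PySem.Str.endswith n (" " ++ q) then 3
  else 4

def exact_match_boost_py_alt (items : List (List (String × String))) (query : Option String) : List (List (String × String)) :=
  let q := PySem.Str.lower (PySem.Str.strip (query.getD ""))
  if q = "" then items
  else (PySem.List.pyRange 0 5 1).flatMap (fun tier => items.filter (fun item => pvRank q item == tier))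

-- ===== PRECONDITION & SPEC =====
def Spec_exact_match_boost_py (items : List (List (String × String))) (query : Option String) (out : List (List (String × String))) : Prop := out = exact_match_boost_py_alt items query
instance (items : List (List (String × String))) (query : Option String) (out : List (List (String × String))) : Decidable (Spec_exact_match_boost_py items query out) := by unfold Spec_exact_match_boost_py; infer_instance

-- ===== CLAIM (what is proved, stated in full; the proofs are below) =====
def Claim_equal_exact_match_boost_py : Prop := ∀ (items : List (List (String × String))) (query : Option String), Dom_exact_match_boost_py items query → Spec_exact_match_boost_py items query (exact_match_boost_py items query)

-- ===== LEMMAS AND PROOFS =====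

-- A's bucket loop, with the buckets characterised as rank-filters of the processed items
lemma pvLoopA (q : String) (items : List (List (String × String)))
    (e p s c r : List (List (String × String))) :
    items.foldl (pvStepA q) (e, p, s, c, r)
    = (e ++ items.filter (fun item => pvRank q item == 0),
       p ++ items.filter (fun item => pvRank q item == 1),
       s ++ items.filter (fun item => pvRank q item == 2),
       c ++ items.filter (fun item => pvRank q item == 3),
       r ++ items.filter (fun item => pvRank q item == 4)) := by
  induction items generalizing e p s c r with
  | nil => simp
  | cons x xs ih =>
    rw [List.foldl_cons]
    by_cases h0 : PySem.Str.lower (PySem.Str.strip (((PySem.Dict.mk x).get? "name").getD "")) = q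
    · have hr : pvRank q x = 0 := by simp only [pvRank]; rw [if_pos h0]
      have hs : pvStepA q (e, p, s, c, r) x = (e ++ [x], p, s, c, r) := by
        simp only [pvStepA]; rw [if_pos h0]
      rw [hs, ih]
      simp [hr, List.append_assoc]
    · by_cases h1 : PySem.Str.lower (PySem.Str.strip (((PySem.Dict.mk x).get? "name").getD "")) = q ++ "s" ∨ PySem.Str.lower (PySem.Str.strip (((PySem.Dict.mk x).get? "name").getD "")) = q ++ "es" ∨ q = PySem.Str.lower (PySem.Str.strip (((PySem.Dict.mk x).get? "name").getD "")) ++ "s" ∨ q = PySem.Str.lower (PySem.Str.strip (((PySem.Dict.mk x).get? "name").getD "")) ++ "es"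
      · have hr : pvRank q x = 1 := by simp only [pvRank]; rw [if_neg h0, if_pos h1]
        have hs : pvStepA q (e, p, s, c, r) x = (e, p ++ [x], s, c, r) := by
          simp only [pvStepA]; rw [if_neg h0, if_pos h1]
        rw [hs, ih]
        simp [hr, List.append_assoc]
      · by_cases h2 : (PySem.Str.startswith (PySem.Str.lower (PySem.Str.strip (((PySem.Dict.mk x).get? "name").getD ""))) (q ++ " ") || PySem.Str.startswith (PySem.Str.lower (PySem.Str.strip (((PySem.Dict.mk x).get? "name").getD ""))) (q ++ ",")) = true
        · have hr : pvRank q x = 2 := by simp only [pvRank]; rw [if_neg h0, if_neg h1, if_pos h2]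
          have hs : pvStepA q (e, p, s, c, r) x = (e, p, s ++ [x], c, r) := by
            simp only [pvStepA]; rw [if_neg h0, if_neg h1, if_pos h2]
          rw [hs, ih]
          simp [hr, List.append_assoc]
        · by_cases h3 : (PySem.Str.isIn (" " ++ q ++ " ") (" " ++ PySem.Str.lower (PySem.Str.strip (((PySem.Dict.mk x).get? "name").getD "")) ++ " ") || PySem.Str.endswith (PySem.Str.lower (PySem.Str.strip (((PySem.Dict.mk x).get? "name").getD ""))) (" " ++ q)) = true
          · have hr : pvRank q x = 3 := by simp only [pvRank]; rw [if_neg h0, if_neg h1, if_neg h2, if_pos h3]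
            have hs : pvStepA q (e, p, s, c, r) x = (e, p, s, c ++ [x], r) := by
              simp only [pvStepA]; rw [if_neg h0, if_neg h1, if_neg h2, if_pos h3]
            rw [hs, ih]
            simp [hr, List.append_assoc]
          · have hr : pvRank q x = 4 := by simp only [pvRank]; rw [if_neg h0, if_neg h1, if_neg h2, if_neg h3]
            have hs : pvStepA q (e, p, s, c, r) x = (e, p, s, c, r ++ [x]) := by
              simp only [pvStepA]; rw [if_neg h0, if_neg h1, if_neg h2, if_neg h3]
            rw [hs, ih]
            simp [hr, List.append_assoc]

-- ===== VERDICT (by name: the statement is the Claim_ definition above) =====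
theorem exact_match_boost_py_spec : Claim_equal_exact_match_boost_py := by
  intro items query _
  show exact_match_boost_py items query = exact_match_boost_py_alt items query
  unfold exact_match_boost_py exact_match_boost_py_alt
  by_cases hq : PySem.Str.lower (PySem.Str.strip (query.getD "")) = ""
  · simp [hq]
  · simp only [if_neg hq, pvLoopA]
    have hr : PySem.List.pyRange 0 5 1 = [0, 1, 2, 3, 4] := by decide
    simp [hr, List.append_assoc]
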